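-- pv_equiv track=rewrite | github.com/mmistroni/Codility | src/beautiful_triplets.py | solution
-- ===== SOURCE A (Python) =====
-- def find_triplets(sequence, indexes, d):
--     #
--     while sequence:
--         if len(indexes) == 3:
--             break
--         latest = indexes[-1]
--         try:
--             fellow = latest + d
--             next = sequence.index(fellow)
--             indexes.append(fellow)
--         except Exception as e:
--             break
--
--     return indexes
--
-- def solution(sequence,d):
--     counts = 0
--     for idx in range(0, len(sequence)):
--         # not working. we need to keep start, and give it to
--         # a separate fun
--         res = find_triplets(sequence[idx+1:], [sequence[idx]], d)
--         if len(res) == 3: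
--             counts +=1
--         continue
--
--     return counts
-- ===== SOURCE B (Python) =====
-- def solution(sequence, d):
--     # Single reverse pass: `seen` holds the values at positions strictly after the
--     # current index; count positions whose +d and +2d values both appear later.
--     seen = set()
--     counts = 0
--     for x in reversed(sequence):
--         if x + d in seen and x + 2 * d in seen:
--             counts += 1
--         seen.add(x)
--     return counts
-- ===== Notes on version B (the rewrite author's own statement) =====
-- stated objective: faster
-- what changed: Replaced A's per-index forward slice-and-scan (find_triplets doing list.index on the tail for each position) with a single right-to-left pass maintaining a set of already-seen later values and counting positions whose +d and +2d values are in it.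
import Mathlib
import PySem

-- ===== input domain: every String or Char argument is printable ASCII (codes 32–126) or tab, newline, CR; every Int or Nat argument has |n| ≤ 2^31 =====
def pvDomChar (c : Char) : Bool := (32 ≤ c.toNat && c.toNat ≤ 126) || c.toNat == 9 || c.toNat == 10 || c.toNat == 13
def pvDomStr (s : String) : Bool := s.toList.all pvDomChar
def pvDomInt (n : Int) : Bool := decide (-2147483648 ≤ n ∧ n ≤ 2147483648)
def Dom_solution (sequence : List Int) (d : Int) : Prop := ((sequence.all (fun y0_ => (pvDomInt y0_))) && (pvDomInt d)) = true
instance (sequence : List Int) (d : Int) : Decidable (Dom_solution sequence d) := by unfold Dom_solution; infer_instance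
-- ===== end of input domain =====

-- B replaces A's per-index forward slice-and-scan with one reverse pass keeping a set of later values (asymptotically faster).


-- ===== PORT A =====
-- the 'while sequence:' loop of find_triplets; from solution's call (indexes = [x], one element)
-- the loop body runs at most 3 times (indexes grows to length 3, then the 'break'), so fuel 3 is exact there.
def findTripletsLoop (sequence : List Int) (d : Int) (indexes : List Int) : Nat → List Int
  | 0 => indexes
  | fuel + 1 =>
    if sequence = [] then indexes                       -- while sequence:
    else if indexes.length = 3 then indexes             -- break
    else
      match indexes.getLast? with                       -- latest = indexes[-1]
      | none => indexes                                 -- unreachable from solution (indexes nonempty)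
      | some latest =>
        let fellow := latest + d
        match PySem.List.index? sequence fellow with    -- next = sequence.index(fellow)
        | none => indexes                               -- ValueError caught: break
        | some _ => findTripletsLoop sequence d (indexes ++ [fellow]) fuel   -- indexes.append(fellow)

def findTriplets (sequence : List Int) (indexes : List Int) (d : Int) : List Int :=
  findTripletsLoop sequence d indexes 3

def solution (sequence : List Int) (d : Int) : Int :=
  (PySem.List.pyRange 0 (sequence.length : Int) 1).foldl
    (fun counts idx =>
      let res := findTriplets (PySem.List.slice sequence (some (idx + 1)) none)
                   [PySem.List.pyGetD sequence idx 0] d    -- sequence[idx]: idx ∈ range(len), in range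
      if res.length = 3 then counts + 1 else counts)
    0

-- ===== PORT B =====
def stepB (d : Int) (st : PySem.Set Int × Int) (x : Int) : PySem.Set Int × Int :=
  let counts := if PySem.Set.contains st.1 (x + d) && PySem.Set.contains st.1 (x + 2 * d)
                then st.2 + 1 else st.2
  (PySem.Set.add st.1 x, counts)

def solution_alt (sequence : List Int) (d : Int) : Int :=
  (sequence.reverse.foldl (stepB d) (PySem.Set.empty, 0)).2

-- ===== PRECONDITION & SPEC =====
def Spec_solution (sequence : List Int) (d : Int) (out : Int) : Prop := out = solution_alt sequence d
instance (sequence : List Int) (d : Int) (out : Int) : Decidable (Spec_solution sequence d out) := by unfold Spec_solution; infer_instance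

-- ===== CLAIM (what is proved, stated in full; the proofs are below) =====
def Claim_equal_solution : Prop := ∀ (sequence : List Int) (d : Int), Dom_solution sequence d → Spec_solution sequence d (solution sequence d)

-- ===== LEMMAS AND PROOFS =====

-- reference count: positions whose +d and +2d values occur strictly later
def cnt (d : Int) : List Int → Int
  | [] => 0
  | a :: t => (if (a + d) ∈ t ∧ (a + d + d) ∈ t then 1 else 0) + cnt d t

lemma findTriplets_len (tail : List Int) (x d : Int) :
    (findTriplets tail [x] d).length = 3 ↔ (x + d) ∈ tail ∧ (x + d + d) ∈ tail := by
  rcases tail with _ | ⟨b, bs⟩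
  · simp [findTriplets, findTripletsLoop]
  · by_cases h1 : (x + d) ∈ b :: bs
    · obtain ⟨k1, hk1⟩ := Option.isSome_iff_exists.mp
        ((PySem.List.index?_isSome_iff _ _).mpr h1)
      by_cases h2 : (x + d + d) ∈ b :: bs
      · obtain ⟨k2, hk2⟩ := Option.isSome_iff_exists.mp
          ((PySem.List.index?_isSome_iff _ _).mpr h2)
        simp only [PySem.List.index?_eq_idxOf?] at hk1 hk2
        simp [findTriplets, findTripletsLoop, hk1, hk2, h1, h2]
      · have hk2 : PySem.List.index? (b :: bs) (x + d + d) = none :=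
          (PySem.List.index?_eq_none_iff _ _).mpr h2
        simp only [PySem.List.index?_eq_idxOf?] at hk1 hk2
        simp [findTriplets, findTripletsLoop, hk1, hk2, h1, h2]
    · have hk1 : PySem.List.index? (b :: bs) (x + d) = none :=
        (PySem.List.index?_eq_none_iff _ _).mpr h1
      simp only [PySem.List.index?_eq_idxOf?] at hk1
      simp [findTriplets, findTripletsLoop, hk1, h1]

lemma pyRange_shift (n : Nat) :
    PySem.List.pyRange 1 ((n : Int) + 1) 1 = (PySem.List.pyRange 0 (n : Int) 1).map (· + 1) := by
  rw [PySem.List.pyRange_one, PySem.List.pyRange_one, List.map_map,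
    show ((n : Int) + 1 - 1).toNat = n by omega, show ((n : Int) - 0).toNat = n by omega]
  refine List.map_congr_left ?_
  intro k _
  simp [Function.comp]
  ring

lemma A_loop (d : Int) : ∀ (s : List Int) (c : Int),
    (PySem.List.pyRange 0 (s.length : Int) 1).foldl
      (fun counts idx =>
        let res := findTriplets (PySem.List.slice s (some (idx + 1)) none)
                     [PySem.List.pyGetD s idx 0] d
        if res.length = 3 then counts + 1 else counts) c = c + cnt d s := by
  intro s
  induction s with
  | nil =>
    intro c
    rw [show ((List.length ([] : List Int)) : Int) = 0 by simp,
      PySem.List.pyRange_one_eq_nil le_rfl]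
    simp [cnt]
  | cons a t ih =>
    intro c
    rw [show (((a :: t).length : Int)) = (t.length : Int) + 1 by push_cast [List.length_cons]; ring,
      PySem.List.pyRange_one_cons (by omega), List.foldl_cons,
      show ((0 : Int) + 1) = 1 by norm_num, pyRange_shift, List.foldl_map]
    have hbody : ∀ i ∈ PySem.List.pyRange 0 (t.length : Int) 1, ∀ cc : Int,
        (let res := findTriplets (PySem.List.slice (a :: t) (some (i + 1 + 1)) none)
                      [PySem.List.pyGetD (a :: t) (i + 1) 0] d
         if res.length = 3 then cc + 1 else cc)
        = (let res := findTriplets (PySem.List.slice t (some (i + 1)) none)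
                        [PySem.List.pyGetD t i 0] d
           if res.length = 3 then cc + 1 else cc) := by
      intro i hi cc
      obtain ⟨hi0, hin⟩ := (PySem.List.mem_pyRange_one).mp hi
      have hk : i = ((i.toNat : Nat) : Int) := by omega
      simp only
      rw [hk, PySem.List.slice_from _ (by omega), PySem.List.slice_from _ (by omega),
        show ((i.toNat : Int) + 1 + 1).toNat = i.toNat + 2 by omega,
        show ((i.toNat : Int) + 1).toNat = i.toNat + 1 by omega,
        show ((i.toNat : Int) + 1) = ((i.toNat + 1 : Nat) : Int) by push_cast; ring,
        PySem.List.pyGetD_natCast, PySem.List.pyGetD_natCast,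
        List.getD_cons_succ, List.drop_succ_cons]
    rw [PySem.List.foldl_congr_mem' _ _
      (fun counts idx =>
        let res := findTriplets (PySem.List.slice t (some (idx + 1)) none)
                     [PySem.List.pyGetD t idx 0] d
        if res.length = 3 then counts + 1 else counts) _ hbody, ih]
    simp only [PySem.List.slice_from_one, List.tail_cons]
    have hg : PySem.List.pyGetD (a :: t) 0 0 = a := by
      simp [PySem.List.pyGetD]
    rw [hg]
    simp only [findTriplets_len, cnt]
    split_ifs <;> omega

lemma B_inv (d : Int) : ∀ (t : List Int),
    (∀ y : Int, y ∈ (t.reverse.foldl (stepB d) (PySem.Set.empty, 0)).1 ↔ y ∈ t) ∧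
    (t.reverse.foldl (stepB d) (PySem.Set.empty, 0)).2 = cnt d t := by
  intro t
  induction t with
  | nil => simp [cnt, PySem.Set.empty]
  | cons a t ih =>
    obtain ⟨ih1, ih2⟩ := ih
    have hF : (a :: t).reverse.foldl (stepB d) (PySem.Set.empty, 0)
        = stepB d (t.reverse.foldl (stepB d) (PySem.Set.empty, 0)) a := by
      rw [List.reverse_cons, List.foldl_append, List.foldl_cons, List.foldl_nil]
    rw [hF]
    have hc : ∀ z : Int,
        PySem.Set.contains (t.reverse.foldl (stepB d) (PySem.Set.empty, 0)).1 z
          = decide (z ∈ t) := by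
      intro z
      rw [Bool.eq_iff_iff]
      simp only [PySem.Set.contains_iff, decide_eq_true_eq]
      exact ih1 z
    constructor
    · intro y
      rw [stepB, PySem.Set.mem_add, ih1, List.mem_cons]
      tauto
    · rw [stepB]
      simp only [hc, ih2, cnt]
      have h2 : a + 2 * d = a + d + d := by ring
      rw [h2]
      by_cases h1 : (a + d) ∈ t <;> by_cases hh : (a + d + d) ∈ t <;>
        simp only [h1, hh, decide_true, decide_false, Bool.and_true, Bool.and_false,
          if_true, if_false, and_self, and_true, and_false] <;> (try simp only [Bool.false_eq_true, if_false]) <;> omega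

-- ===== VERDICT (by name: the statement is the Claim_ definition above) =====
theorem solution_spec : Claim_equal_solution := by
  intro s d _
  unfold Spec_solution solution solution_alt
  rw [A_loop, (B_inv d s).2, zero_add]
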